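-- pv_equiv track=rewrite | github.com/DAY0522/Algorithm | Python3/프로그래머스/2/250136. ［PCCP 기출문제］ 2번 ／ 석유 시추/［PCCP 기출문제］ 2번 ／ 석유 시추.py | solution
-- ===== SOURCE A (Python) =====
-- from collections import deque
--
-- def solution(land):
--     answer = 0
--
--     HEIGHT, WIDTH = len(land), len(land[0])
--     visited = [[0] * WIDTH for _ in range(HEIGHT)] # 몇 번째 석유 덩어리인지 기록
--     count = {}
--
--     cur_num = 0
--     dx = [-1, 1, 0, 0]
--     dy = [0, 0, -1, 1]
--     for i in range(HEIGHT):
--         for j in range(WIDTH):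
--             if land[i][j] and not visited[i][j]:
--                 que = deque([(i, j)])
--                 cur_num += 1
--                 count[cur_num] = 1
--                 visited[i][j] = cur_num
--
--                 while que:
--                     x, y = que.popleft()
--                     for d in range(4):
--                         nx = x + dx[d]
--                         ny = y + dy[d]
--                         if nx >= 0 and nx < HEIGHT and ny >=0 and ny < WIDTH:
--                             if land[nx][ny] and not visited[nx][ny]:
--                                 que.append((nx, ny))
--                                 visited[nx][ny] = cur_num
--                                 count[cur_num] += 1
--     for w in range(WIDTH):
--         result = set()
--         for h in range(HEIGHT):
--             if visited[h][w]:
--                 result.add(visited[h][w])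
--
--         cur = 0
--         for r in result:
--             cur += count[r]
--
--         if cur > answer:
--             answer = cur
--
--     return answer
-- ===== SOURCE B (Python) =====
-- def solution(land):
--     H, W = len(land), len(land[0])
--     best = 0
--     for w in range(W):
--         # multi-source flood from every oil cell of column w; count reachable cells
--         cells = set()
--         frontier = []
--         for i in range(H):
--             if land[i][w]:
--                 cells.add((i, w))
--                 frontier.append((i, w))
--         while frontier:
--             nxt = []
--             for (i, j) in frontier:
--                 for (ni, nj) in ((i - 1, j), (i + 1, j), (i, j - 1), (i, j + 1)):
--                     if 0 <= ni < H and 0 <= nj < W and land[ni][nj] and (ni, nj) not in cells: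
--                         cells.add((ni, nj))
--                         nxt.append((ni, nj))
--             frontier = nxt
--         best = max(best, len(cells))
--     return best
-- ===== Notes on version B (the rewrite author's own statement) =====
-- stated objective: alternative
-- what changed: Replaces A's single global BFS labelling (visited grid + per-blob count dict + per-column set of blob ids summed) by an independent per-column multi-source frontier flood that directly counts the cells reachable from the column's oil cells.
-- outside the precondition, e.g. on solution([]): A raises IndexError, B raises IndexError; on solution([[1, 1], [1]]): A raises IndexError, B raises IndexError
import Mathlib
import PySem

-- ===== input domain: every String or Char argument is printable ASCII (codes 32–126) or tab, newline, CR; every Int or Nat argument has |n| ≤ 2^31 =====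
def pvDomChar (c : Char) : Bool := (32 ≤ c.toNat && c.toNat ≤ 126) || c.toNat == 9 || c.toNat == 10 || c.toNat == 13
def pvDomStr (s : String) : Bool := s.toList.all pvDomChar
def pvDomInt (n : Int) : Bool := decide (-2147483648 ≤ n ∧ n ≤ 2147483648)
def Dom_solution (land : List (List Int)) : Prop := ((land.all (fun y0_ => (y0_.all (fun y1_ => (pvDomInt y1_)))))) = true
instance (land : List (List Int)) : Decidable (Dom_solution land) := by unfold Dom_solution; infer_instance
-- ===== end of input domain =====

-- B replaces A's single global BFS labelling (visited grid + per-label count dict) by an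
-- independent per-column multi-source frontier saturation that directly counts the cells
-- reachable from each column; same return value, no speed claim.

-- ===== PORT A =====
-- shared 2-D read: land[i][j] / visited[i][j]; reads are guarded 0 ≤ i < H, 0 ≤ j < W,
-- where pyGetD is exact under Pre_ (rows at least W long)
def pvG (m : List (List Int)) (i j : Int) : Int :=
  PySem.List.pyGetD (PySem.List.pyGetD m i []) j 0

-- visited[i][j] = v (indices in range at every use)
def pvSet2 (m : List (List Int)) (i j : Int) (v : Int) : List (List Int) :=
  PySem.List.pySetD m i (PySem.List.pySetD (PySem.List.pyGetD m i []) j v)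

-- the four (dx[d], dy[d]) pairs, d = 0..3, in A's order; B's neighbour tuple is the same order
def pvDirs : List (Int × Int) := [(-1, 0), (1, 0), (0, -1), (0, 1)]

-- body of A's `for d in range(4):` loop, acting on (que, visited, count)
def pvBFSStep (land : List (List Int)) (H W cur x y : Int)
    (s : List (Int × Int) × List (List Int) × PySem.Dict Int Int) (d : Int × Int) :
    List (Int × Int) × List (List Int) × PySem.Dict Int Int :=
  let nx := x + d.1
  let ny := y + d.2
  if 0 ≤ nx ∧ nx < H ∧ 0 ≤ ny ∧ ny < W ∧ pvG land nx ny ≠ 0 ∧ pvG s.2.1 nx ny = 0 then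
    -- count[cur_num] += 1 : the key is present, so modify with default 0 is exact
    (s.1 ++ [(nx, ny)], pvSet2 s.2.1 nx ny cur, s.2.2.modify cur 0 (· + 1))
  else s

-- the `while que:` BFS loop; fuel only makes the recursion structural (sufficient: proved below)
def pvBFS (land : List (List Int)) (H W cur : Int) :
    Nat → List (Int × Int) → List (List Int) → PySem.Dict Int Int →
    List (List Int) × PySem.Dict Int Int
  | _, [], vis, cnt => (vis, cnt)
  | 0, _, vis, cnt => (vis, cnt)   -- fuel exhaustion: unreachable for the fuel supplied
  | fuel + 1, (x, y) :: que, vis, cnt =>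
      let s := pvDirs.foldl (pvBFSStep land H W cur x y) (que, vis, cnt)
      pvBFS land H W cur fuel s.1 s.2.1 s.2.2

-- body of the `for j in range(WIDTH):` scan over (visited, count, cur_num)
def pvScanCell (land : List (List Int)) (H W i : Int)
    (st : List (List Int) × PySem.Dict Int Int × Int) (j : Int) :
    List (List Int) × PySem.Dict Int Int × Int :=
  if pvG land i j ≠ 0 ∧ pvG st.1 i j = 0 then
    let cur := st.2.2 + 1
    let r := pvBFS land H W cur ((H * W).toNat + 1) [(i, j)]
               (pvSet2 st.1 i j cur) (st.2.1.insert cur 1)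
    (r.1, r.2, cur)
  else st

-- `result` for one column: the set of blob ids seen in column w
def pvColLabels (vis : List (List Int)) (H w : Int) : PySem.Set Int :=
  (PySem.List.pyRange 0 H 1).foldl
    (fun res h => if pvG vis h w ≠ 0 then PySem.Set.add res (pvG vis h w) else res)
    PySem.Set.empty

-- `for r in result: cur += count[r]` — a sum over a set, order-independent; keys present, getD exact
def pvColSum (cnt : PySem.Dict Int Int) (res : PySem.Set Int) : Int :=
  res.foldl (fun c r => c + cnt.getD r 0) 0

def solution (land : List (List Int)) : Int :=
  let H := PySem.List.len land
  let W := PySem.List.len (PySem.List.pyGetD land 0 [])   -- land[0]: Pre_ gives land ≠ []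
  let vis0 : List (List Int) := List.replicate H.toNat (List.replicate W.toNat 0)
  let st := (PySem.List.pyRange 0 H 1).foldl
    (fun st i => (PySem.List.pyRange 0 W 1).foldl (pvScanCell land H W i) st)
    (vis0, PySem.Dict.empty, 0)
  (PySem.List.pyRange 0 W 1).foldl (fun answer w =>
    let cur := pvColSum st.2.1 (pvColLabels st.1 H w)
    if cur > answer then cur else answer) 0

-- ===== PORT B =====
-- body of B's loop over the four neighbour offsets, acting on (cells, nxt)
def pvGrowStep (land : List (List Int)) (H W : Int) (p : Int × Int)
    (s : PySem.Set (Int × Int) × List (Int × Int)) (d : Int × Int) :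
    PySem.Set (Int × Int) × List (Int × Int) :=
  let n := (p.1 + d.1, p.2 + d.2)
  if 0 ≤ n.1 ∧ n.1 < H ∧ 0 ≤ n.2 ∧ n.2 < W ∧ pvG land n.1 n.2 ≠ 0 ∧ ¬ n ∈ s.1 then
    (PySem.Set.add s.1 n, s.2 ++ [n])
  else s

-- the `while frontier:` saturation rounds; fuel only makes the recursion structural
def pvGrow (land : List (List Int)) (H W : Int) :
    Nat → PySem.Set (Int × Int) → List (Int × Int) → PySem.Set (Int × Int)
  | _, cells, [] => cells
  | 0, cells, _ => cells          -- fuel exhaustion: unreachable for the fuel supplied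
  | fuel + 1, cells, frontier =>
      let s := frontier.foldl (fun s p => pvDirs.foldl (pvGrowStep land H W p) s)
                 (cells, ([] : List (Int × Int)))
      pvGrow land H W fuel s.1 s.2

-- the seed set / seed frontier of column w: the oil cells of the column
def pvColInit (land : List (List Int)) (H w : Int) :
    PySem.Set (Int × Int) × List (Int × Int) :=
  (PySem.List.pyRange 0 H 1).foldl
    (fun s i => if pvG land i w ≠ 0 then (PySem.Set.add s.1 (i, w), s.2 ++ [(i, w)]) else s)
    (PySem.Set.empty, [])

def solution_alt (land : List (List Int)) : Int :=
  let H := PySem.List.len land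
  let W := PySem.List.len (PySem.List.pyGetD land 0 [])
  (PySem.List.pyRange 0 W 1).foldl (fun best w =>
    let init := pvColInit land H w
    let cells := pvGrow land H W (H * W).toNat init.1 init.2
    max best (PySem.List.len cells)) 0

-- ===== PRECONDITION & SPEC =====
-- Pre_ excludes exactly the inputs where A raises: land = [] (IndexError on land[0]) and
-- grids with a row shorter than row 0 (IndexError in the scan `land[i][j]` for j in range(W)).
def Pre_solution (land : List (List Int)) : Prop :=
  land ≠ [] ∧ ∀ row ∈ land, (land.headD []).length ≤ row.length
instance (land : List (List Int)) : Decidable (Pre_solution land) := by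
  unfold Pre_solution; infer_instance

def pvWitness_solution : List (List Int) := [[1, 0], [1, 1]]

def Spec_solution (land : List (List Int)) (out : Int) : Prop := out = solution_alt land
instance (land : List (List Int)) (out : Int) : Decidable (Spec_solution land out) := by
  unfold Spec_solution; infer_instance

-- ===== CLAIM (what is proved, stated in full; the proofs are below) =====
def Claim_equal_solution : Prop :=
  ∀ (land : List (List Int)), Dom_solution land → Pre_solution land →
    Spec_solution land (solution land)

-- ===== LEMMAS AND PROOFS =====

-- ---- abstraction: grid geometry, oil cells, adjacency, reachability ----

def pvH (land : List (List Int)) : Int := PySem.List.len land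
def pvW (land : List (List Int)) : Int := PySem.List.len (PySem.List.pyGetD land 0 [])

def pvLab (m : List (List Int)) (p : Int × Int) : Int := pvG m p.1 p.2

def pvOil (land : List (List Int)) (p : Int × Int) : Prop :=
  0 ≤ p.1 ∧ p.1 < pvH land ∧ 0 ≤ p.2 ∧ p.2 < pvW land ∧ pvG land p.1 p.2 ≠ 0

def pvAdj (land : List (List Int)) (p q : Int × Int) : Prop :=
  pvOil land p ∧ pvOil land q ∧ ∃ d ∈ pvDirs, q = (p.1 + d.1, p.2 + d.2)

def pvReach (land : List (List Int)) : (Int × Int) → (Int × Int) → Prop :=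
  Relation.ReflTransGen (pvAdj land)

noncomputable def pvU (land : List (List Int)) : Finset (Int × Int) :=
  Finset.Icc 0 (pvH land - 1) ×ˢ Finset.Icc 0 (pvW land - 1)

-- cells reachable from some oil cell of column w
def pvRCset (land : List (List Int)) (w : Int) (p : Int × Int) : Prop :=
  ∃ q : Int × Int, q.2 = w ∧ pvOil land q ∧ pvReach land q p

lemma mem_pvU {land : List (List Int)} {p : Int × Int} :
    p ∈ pvU land ↔ 0 ≤ p.1 ∧ p.1 < pvH land ∧ 0 ≤ p.2 ∧ p.2 < pvW land := by
  rw [pvU, Finset.mem_product, Finset.mem_Icc, Finset.mem_Icc]; omega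

lemma pvOil_mem_pvU {land : List (List Int)} {p : Int × Int} (h : pvOil land p) :
    p ∈ pvU land := mem_pvU.mpr ⟨h.1, h.2.1, h.2.2.1, h.2.2.2.1⟩

lemma pvAdj_symm {land : List (List Int)} {p q : Int × Int} (h : pvAdj land p q) :
    pvAdj land q p := by
  obtain ⟨hp, hq, d, hd, hqe⟩ := h
  subst hqe
  refine ⟨hq, hp, (-d.1, -d.2), ?_, ?_⟩
  · simp only [pvDirs, List.mem_cons, List.not_mem_nil, or_false] at hd
    rcases hd with rfl | rfl | rfl | rfl <;> decide
  · cases p with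
    | mk a b => simp

lemma pvReach_oil {land : List (List Int)} {p q : Int × Int} (h : pvReach land p q)
    (hp : pvOil land p) : pvOil land q := by
  induction h with
  | refl => exact hp
  | tail _ e _ => exact e.2.1

lemma pvH_nonneg (land : List (List Int)) : 0 ≤ pvH land := by
  rw [pvH, PySem.List.len_eq]; exact Int.natCast_nonneg _

lemma pvW_nonneg (land : List (List Int)) : 0 ≤ pvW land := by
  rw [pvW, PySem.List.len_eq]; exact Int.natCast_nonneg _

lemma pvU_card (land : List (List Int)) :
    (pvU land).card = (pvH land * pvW land).toNat := by
  rw [pvU, Finset.card_product, Int.card_Icc, Int.card_Icc,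
    Int.toNat_mul (pvH_nonneg land) (pvW_nonneg land)]
  congr 1 <;> omega

-- ---- 2-D grid access lemmas ----

def pvShaped (land : List (List Int)) (m : List (List Int)) : Prop :=
  m.length = (pvH land).toNat ∧ ∀ r ∈ m, r.length = (pvW land).toNat

lemma pvShaped_replicate (land : List (List Int)) :
    pvShaped land (List.replicate (pvH land).toNat (List.replicate (pvW land).toNat 0)) := by
  constructor
  · simp
  · intro r hr; rw [List.eq_of_mem_replicate hr]; simp

-- a pyGetD value is an element or the default (no range analysis needed)
lemma pvGetD_mem_or_default {α : Type} (xs : List α) (i : Int) (d : α) :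
    PySem.List.pyGetD xs i d ∈ xs ∨ PySem.List.pyGetD xs i d = d := by
  rcases hv : PySem.List.pyGet? xs i with _ | v
  · right; simp [PySem.List.pyGetD, hv]
  · left
    have hm := PySem.List.mem_of_pyGet?_eq_some xs hv
    simpa [PySem.List.pyGetD, hv] using hm

lemma pvLab_replicate {land : List (List Int)} {p : Int × Int} :
    pvLab (List.replicate (pvH land).toNat (List.replicate (pvW land).toNat 0)) p = 0 := by
  rw [pvLab, pvG]
  rcases pvGetD_mem_or_default (List.replicate (pvH land).toNat
      (List.replicate (pvW land).toNat (0 : Int))) p.1 [] with hrow | hrow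
  · rw [List.eq_of_mem_replicate hrow]
    rcases pvGetD_mem_or_default (List.replicate (pvW land).toNat (0 : Int)) p.2 0 with h | h
    · exact List.eq_of_mem_replicate h
    · exact h
  · rw [hrow]
    rcases pvGetD_mem_or_default ([] : List Int) p.2 0 with h | h
    · cases h
    · exact h

lemma pvShaped_set2 {land m : List (List Int)} {i j v : Int} (hs : pvShaped land m)
    (hi : 0 ≤ i) (hiH : i < pvH land) : pvShaped land (pvSet2 m i j v) := by
  obtain ⟨hlen, hrows⟩ := hs
  rw [pvSet2, PySem.List.pySetD_of_nonneg m _ hi]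
  constructor
  · rw [List.length_set]; exact hlen
  · intro r hr
    rcases List.mem_or_eq_of_mem_set hr with h | h
    · exact hrows r h
    · subst h
      rw [PySem.List.length_pySetD]
      exact hrows _ (PySem.List.pyGetD_mem m [] (by constructor <;> omega))

lemma pvLab_set2 {land m : List (List Int)} {i j v : Int} (hs : pvShaped land m)
    (hij : (i, j) ∈ pvU land) {p : Int × Int} (hp : p ∈ pvU land) :
    pvLab (pvSet2 m i j v) p = if p = (i, j) then v else pvLab m p := by
  obtain ⟨hi, hiH, hj, hjW⟩ := mem_pvU.mp hij
  obtain ⟨hp1, hp1H, hp2, hp2W⟩ := mem_pvU.mp hp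
  obtain ⟨hlen, hrows⟩ := hs
  simp only at hi hiH hj hjW
  have hitn : i.toNat < m.length := by omega
  have hptn : p.1.toNat < m.length := by omega
  have hrowi : PySem.List.pyGetD m i [] = m[i.toNat] :=
    PySem.List.pyGetD_eq_getElem m [] hi (by omega)
  have hrleni : (m[i.toNat]).length = (pvW land).toNat := hrows _ (List.getElem_mem _)
  have hrlenp : (m[p.1.toNat]).length = (pvW land).toNat := hrows _ (List.getElem_mem _)
  have hset : pvSet2 m i j v = m.set i.toNat ((m[i.toNat]).set j.toNat v) := by
    rw [pvSet2, PySem.List.pySetD_of_nonneg m _ hi, hrowi,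
      PySem.List.pySetD_of_nonneg _ _ hj]
  have hmg : pvLab m p = (m[p.1.toNat])[p.2.toNat] := by
    rw [pvLab, pvG, PySem.List.pyGetD_eq_getElem m [] hp1 (by omega),
      PySem.List.pyGetD_eq_getElem _ 0 hp2 (by omega)]
  rw [pvLab, pvG, hset,
    PySem.List.pyGetD_eq_getElem _ [] hp1 (by simp only [List.length_set]; omega),
    List.getElem_set]
  by_cases hcase : i.toNat = p.1.toNat
  · rw [if_pos hcase,
      PySem.List.pyGetD_eq_getElem _ 0 hp2 (by simp only [List.length_set, hrleni]; omega),
      List.getElem_set]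
    by_cases hc2 : j.toNat = p.2.toNat
    · rw [if_pos hc2, if_pos (show p = (i, j) from
        Prod.ext (by omega) (by omega))]
    · rw [if_neg hc2, if_neg (show ¬ p = (i, j) from
        fun hcon => hc2 (by rw [hcon]))]
      simp only [hcase]
      rw [hmg]
  · rw [if_neg hcase, if_neg (show ¬ p = (i, j) from
      fun hcon => hcase (by rw [hcon])), hmg,
      PySem.List.pyGetD_eq_getElem _ 0 hp2 (by rw [hrlenp]; omega)]

-- ---- invariant components shared by the scan and the BFS ----

def pvLabsOK (land : List (List Int)) (cur : Int) (vis : List (List Int)) : Prop :=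
  ∀ p ∈ pvU land, pvLab vis p ≠ 0 → pvOil land p ∧ 1 ≤ pvLab vis p ∧ pvLab vis p ≤ cur

def pvReachOK (land : List (List Int)) (vis : List (List Int)) : Prop :=
  ∀ p ∈ pvU land, ∀ q ∈ pvU land, pvLab vis p ≠ 0 → pvLab vis p = pvLab vis q →
    pvReach land p q

def pvCntOK (land : List (List Int)) (cur : Int) (vis : List (List Int))
    (cnt : PySem.Dict Int Int) : Prop :=
  ∀ r : Int, 1 ≤ r → r ≤ cur →
    cnt.getD r 0 = (((pvU land).filter (fun p => pvLab vis p = r)).card : Int)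

def pvClosedQ (land : List (List Int)) (vis : List (List Int)) (Q : List (Int × Int)) : Prop :=
  ∀ p q, pvAdj land p q → pvLab vis p ≠ 0 → pvLab vis q = pvLab vis p ∨ p ∈ Q

def pvBInv (land : List (List Int)) (cur : Int) (vis : List (List Int))
    (cnt : PySem.Dict Int Int) (Q : List (Int × Int)) : Prop :=
  pvShaped land vis ∧ 1 ≤ cur ∧ pvLabsOK land cur vis ∧ pvReachOK land vis ∧
  pvCntOK land cur vis cnt ∧ (∀ p ∈ Q, p ∈ pvU land ∧ pvLab vis p = cur) ∧ Q.Nodup ∧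
  pvClosedQ land vis Q

-- number of unlabelled cells (the BFS fuel measure)
noncomputable def pvUnl (land : List (List Int)) (m : List (List Int)) : Nat :=
  (((pvU land).filter (fun p => pvLab m p = 0))).card

-- ---- the BFS while-loop: invariant preservation and postcondition ----

-- the state of the dirs-fold relative to its initial state (que, vis, cnt), popped cell (x,y)
def pvFoldInv (land : List (List Int)) (cur x y : Int) (que : List (Int × Int))
    (vis : List (List Int)) (s : List (Int × Int) × List (List Int) × PySem.Dict Int Int) : Prop :=
  pvShaped land s.2.1 ∧
  (∀ p ∈ pvU land, pvLab vis p ≠ 0 → pvLab s.2.1 p = pvLab vis p) ∧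
  (∀ p ∈ pvU land, pvLab s.2.1 p ≠ pvLab vis p →
    pvLab vis p = 0 ∧ pvLab s.2.1 p = cur ∧ pvAdj land (x, y) p) ∧
  (∀ p ∈ s.1, p ∈ que ∨
    (p ∈ pvU land ∧ pvLab vis p = 0 ∧ pvLab s.2.1 p = cur ∧ pvAdj land (x, y) p)) ∧
  (∀ p ∈ pvU land, pvLab vis p = 0 → pvLab s.2.1 p ≠ 0 → p ∈ s.1) ∧
  (∀ p ∈ que, p ∈ s.1) ∧
  pvCntOK land cur s.2.1 s.2.2 ∧
  (pvUnl land s.2.1 + s.1.length = pvUnl land vis + que.length) ∧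
  s.1.Nodup

lemma pvBFSStep_shaped {land : List (List Int)} {cur x y : Int} {s} {d : Int × Int}
    (hs : pvShaped land s.2.1) :
    pvShaped land (pvBFSStep land (pvH land) (pvW land) cur x y s d).2.1 := by
  by_cases hgd : (0 ≤ x + d.1 ∧ x + d.1 < pvH land ∧ 0 ≤ y + d.2 ∧ y + d.2 < pvW land ∧
      pvG land (x + d.1) (y + d.2) ≠ 0 ∧ pvG s.2.1 (x + d.1) (y + d.2) = 0)
  · simp only [pvBFSStep, if_pos hgd]
    exact pvShaped_set2 hs hgd.1 hgd.2.1
  · simp only [pvBFSStep, if_neg hgd]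
    exact hs

lemma pvBFSStep_mono0 {land : List (List Int)} {cur x y : Int} {s} {d : Int × Int}
    {p : Int × Int} (hp : p ∈ pvU land) (hs : pvShaped land s.2.1)
    (h : pvLab s.2.1 p ≠ 0) :
    pvLab (pvBFSStep land (pvH land) (pvW land) cur x y s d).2.1 p ≠ 0 := by
  by_cases hgd : (0 ≤ x + d.1 ∧ x + d.1 < pvH land ∧ 0 ≤ y + d.2 ∧ y + d.2 < pvW land ∧
      pvG land (x + d.1) (y + d.2) ≠ 0 ∧ pvG s.2.1 (x + d.1) (y + d.2) = 0)
  · simp only [pvBFSStep, if_pos hgd]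
    have hnU : (x + d.1, y + d.2) ∈ pvU land :=
      mem_pvU.mpr ⟨hgd.1, hgd.2.1, hgd.2.2.1, hgd.2.2.2.1⟩
    rw [pvLab_set2 hs hnU hp]
    split
    · next heq =>
      exfalso
      exact h (by rw [heq]; exact hgd.2.2.2.2.2)
    · exact h
  · simp only [pvBFSStep, if_neg hgd]
    exact h

lemma pvBFSStep_inv {land : List (List Int)} {cur x y : Int} {que : List (Int × Int)}
    {vis : List (List Int)} {s} {d : Int × Int}
    (hd : d ∈ pvDirs) (hxyOil : pvOil land (x, y))
    (hcur : 1 ≤ cur)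
    (hque : ∀ p ∈ que, p ∈ pvU land ∧ pvLab vis p = cur)
    (h : pvFoldInv land cur x y que vis s) :
    pvFoldInv land cur x y que vis (pvBFSStep land (pvH land) (pvW land) cur x y s d) := by
  obtain ⟨hsh, hmon, hnew, hqc, hqc2, hqsub, hcnt, hmeas, hnd⟩ := h
  by_cases hgd : (0 ≤ x + d.1 ∧ x + d.1 < pvH land ∧ 0 ≤ y + d.2 ∧ y + d.2 < pvW land ∧
      pvG land (x + d.1) (y + d.2) ≠ 0 ∧ pvG s.2.1 (x + d.1) (y + d.2) = 0)
  · simp only [pvBFSStep, if_pos hgd]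
    obtain ⟨h1, h2, h3, h4, h5, h6⟩ := hgd
    have h6' : pvLab s.2.1 (x + d.1, y + d.2) = 0 := h6
    set n : Int × Int := (x + d.1, y + d.2) with hn
    have hnU : n ∈ pvU land := mem_pvU.mpr ⟨h1, h2, h3, h4⟩
    have hnOil : pvOil land n := ⟨h1, h2, h3, h4, h5⟩
    have hAdj : pvAdj land (x, y) n := ⟨hxyOil, hnOil, d, hd, rfl⟩
    have hvisn0 : pvLab vis n = 0 := by
      by_contra hcon
      have hmm := hmon n hnU hcon
      rw [hmm] at h6'
      exact hcon h6' 
    have hlabeq : ∀ p ∈ pvU land,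
        pvLab (pvSet2 s.2.1 n.1 n.2 cur) p = if p = n then cur else pvLab s.2.1 p := by
      intro p hp
      exact pvLab_set2 hsh hnU hp
    refine ⟨pvShaped_set2 hsh h1 h2, ?_, ?_, ?_, ?_, ?_, ?_, ?_, ?_⟩
    · -- mono
      intro p hp hvp
      rw [hlabeq p hp]
      rw [if_neg (by rintro rfl; exact hvp hvisn0)]
      exact hmon p hp hvp
    · -- new cells
      intro p hp hch
      rw [hlabeq p hp] at hch
      by_cases hpn : p = n
      · subst hpn
        rw [if_pos rfl] at hch
        exact ⟨hvisn0, by rw [hlabeq n hp, if_pos rfl], hAdj⟩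
      · rw [if_neg hpn] at hch
        obtain ⟨ha, hb, hc⟩ := hnew p hp hch
        exact ⟨ha, by rw [hlabeq p hp, if_neg hpn]; exact hb, hc⟩
    · -- queue members characterisation
      intro p hpmem
      rcases List.mem_append.mp hpmem with hmem | hmem
      · rcases hqc p hmem with hl | ⟨ha, hb, hc, he⟩
        · exact Or.inl hl
        · refine Or.inr ⟨ha, hb, ?_, he⟩
          rw [hlabeq p ha, if_neg (by rintro rfl; rw [hc] at h6'; omega)]
          exact hc
      · have : p = n := by simpa using hmem
        subst this
        exact Or.inr ⟨hnU, hvisn0, by rw [hlabeq _ hnU, if_pos rfl], hAdj⟩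
    · -- fresh labelled cells are queued
      intro p hp hv0 hl
      rw [hlabeq p hp] at hl
      by_cases hpn : p = n
      · subst hpn; simp
      · rw [if_neg hpn] at hl
        exact List.mem_append_left _ (hqc2 p hp hv0 hl)
    · -- que ⊆ queue
      intro p hpq
      exact List.mem_append_left _ (hqsub p hpq)
    · -- counts
      intro r hr1 hr2
      by_cases hrc : r = cur
      · rw [hrc, PySem.Dict.getD_modify_self, hcnt cur (by omega) (by omega)]
        have hset : (pvU land).filter (fun p => pvLab (pvSet2 s.2.1 n.1 n.2 cur) p = cur) =
            insert n ((pvU land).filter (fun p => pvLab s.2.1 p = cur)) := by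
          ext q
          simp only [Finset.mem_filter, Finset.mem_insert]
          constructor
          · rintro ⟨hqU, hql⟩
            rw [hlabeq q hqU] at hql
            by_cases hqn : q = n
            · exact Or.inl hqn
            · rw [if_neg hqn] at hql; exact Or.inr ⟨hqU, hql⟩
          · rintro (rfl | ⟨hqU, hql⟩)
            · exact ⟨hnU, by rw [hlabeq _ hnU, if_pos rfl]⟩
            · refine ⟨hqU, ?_⟩
              rw [hlabeq q hqU, if_neg (by rintro rfl; rw [h6'] at hql; omega)]
              exact hql
        rw [hset, Finset.card_insert_of_notMem (by
          simp only [Finset.mem_filter, not_and]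
          intro _ hcon
          rw [h6'] at hcon; omega)]
        push_cast
        ring
      · rw [PySem.Dict.getD_modify_of_ne _ _ _ hrc, hcnt r hr1 hr2]
        have hset : (pvU land).filter (fun p => pvLab (pvSet2 s.2.1 n.1 n.2 cur) p = r) =
            (pvU land).filter (fun p => pvLab s.2.1 p = r) := by
          ext q
          simp only [Finset.mem_filter]
          constructor
          · rintro ⟨hqU, hql⟩
            rw [hlabeq q hqU] at hql
            by_cases hqn : q = n
            · rw [if_pos hqn] at hql; exact absurd hql.symm hrc
            · rw [if_neg hqn] at hql; exact ⟨hqU, hql⟩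
          · rintro ⟨hqU, hql⟩
            refine ⟨hqU, ?_⟩
            rw [hlabeq q hqU, if_neg (by rintro rfl; rw [h6'] at hql; omega)]
            exact hql
        rw [hset]
    · -- measure
      have hset : (pvU land).filter (fun p => pvLab (pvSet2 s.2.1 n.1 n.2 cur) p = 0) =
          ((pvU land).filter (fun p => pvLab s.2.1 p = 0)).erase n := by
        ext q
        simp only [Finset.mem_filter, Finset.mem_erase]
        constructor
        · rintro ⟨hqU, hql⟩
          rw [hlabeq q hqU] at hql
          by_cases hqn : q = n
          · rw [if_pos hqn] at hql; omega
          · rw [if_neg hqn] at hql; exact ⟨hqn, hqU, hql⟩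
        · rintro ⟨hqn, hqU, hql⟩
          exact ⟨hqU, by rw [hlabeq q hqU, if_neg hqn]; exact hql⟩
      have hmemn : n ∈ (pvU land).filter (fun p => pvLab s.2.1 p = 0) := by
        simp only [Finset.mem_filter]
        exact ⟨hnU, h6'⟩
      have hcard := Finset.card_erase_of_mem hmemn
      have hpos : 1 ≤ ((pvU land).filter (fun p => pvLab s.2.1 p = 0)).card :=
        Finset.card_pos.mpr ⟨n, hmemn⟩
      simp only [pvUnl] at hmeas ⊢
      rw [hset, hcard, List.length_append, List.length_singleton]
      omega
    · -- nodup
      have hnotin : n ∉ s.1 := by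
        intro hcon
        rcases hqc n hcon with hl | ⟨_, _, hc, _⟩
        · have := (hque n hl).2
          exact absurd this (by rw [hvisn0]; omega)
        · rw [h6'] at hc; omega
      refine List.nodup_append.mpr ⟨hnd, List.nodup_singleton _, ?_⟩
      intro a ha b hb
      rw [List.mem_singleton.mp hb]
      rintro rfl
      exact hnotin ha
  · simp only [pvBFSStep, if_neg hgd]
    exact ⟨hsh, hmon, hnew, hqc, hqc2, hqsub, hcnt, hmeas, hnd⟩

-- full dirs fold: labels never drop back to 0
lemma pvDirsFold_mono0 {land : List (List Int)} {cur x y : Int} :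
    ∀ (ds : List (Int × Int)) (s), pvShaped land s.2.1 → ∀ p ∈ pvU land,
    pvLab s.2.1 p ≠ 0 →
    pvLab ((ds.foldl (pvBFSStep land (pvH land) (pvW land) cur x y) s)).2.1 p ≠ 0 := by
  intro ds
  induction ds with
  | nil => intro s _ p _ h; exact h
  | cons d ds ih =>
      intro s hs p hp h
      exact ih _ (pvBFSStep_shaped hs) p hp (pvBFSStep_mono0 hp hs h)

lemma pvDirsFold {land : List (List Int)} {cur x y : Int} {que : List (Int × Int)}
    {vis : List (List Int)}
    (hxyOil : pvOil land (x, y)) (hcur : 1 ≤ cur)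
    (hque : ∀ p ∈ que, p ∈ pvU land ∧ pvLab vis p = cur) :
    ∀ (ds : List (Int × Int)), (∀ d ∈ ds, d ∈ pvDirs) → ∀ s,
    pvFoldInv land cur x y que vis s →
    pvFoldInv land cur x y que vis
      (ds.foldl (pvBFSStep land (pvH land) (pvW land) cur x y) s) ∧
    (∀ d ∈ ds, pvOil land (x + d.1, y + d.2) →
      pvLab (ds.foldl (pvBFSStep land (pvH land) (pvW land) cur x y) s).2.1
        (x + d.1, y + d.2) ≠ 0) := by
  intro ds
  induction ds with
  | nil => intro _ s h; exact ⟨h, by simp⟩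
  | cons d ds ih =>
      intro hds s h
      have hstep := pvBFSStep_inv (hds d (by simp)) hxyOil hcur hque h
      obtain ⟨hfin, hrest⟩ := ih (fun e he => hds e (List.mem_cons_of_mem _ he)) _ hstep
      refine ⟨hfin, ?_⟩
      intro e he hoil
      rcases List.mem_cons.mp he with rfl | he'
      · -- e = d: after its own step the neighbour is labelled, and labels persist
        apply pvDirsFold_mono0 ds _ (pvBFSStep_shaped h.1) _ (pvOil_mem_pvU hoil)
        by_cases hgd : (0 ≤ x + e.1 ∧ x + e.1 < pvH land ∧ 0 ≤ y + e.2 ∧ y + e.2 < pvW land ∧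
            pvG land (x + e.1) (y + e.2) ≠ 0 ∧ pvG s.2.1 (x + e.1) (y + e.2) = 0)
        · simp only [pvBFSStep, if_pos hgd]
          rw [pvLab_set2 h.1 (pvOil_mem_pvU hoil) (pvOil_mem_pvU hoil), if_pos rfl]
          omega
        · -- the guard failed although the cell is in-grid oil: it was labelled already
          have hlab0 : pvLab s.2.1 (x + e.1, y + e.2) ≠ 0 := by
            obtain ⟨o1, o2, o3, o4, o5⟩ := hoil
            intro hcon
            exact hgd ⟨o1, o2, o3, o4, o5, hcon⟩
          simp only [pvBFSStep, if_neg hgd]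
          exact hlab0
      · exact hrest e he' hoil

lemma pvBFS_post {land : List (List Int)} {cur : Int} :
    ∀ (fuel : Nat) (Q : List (Int × Int)) (vis : List (List Int)) (cnt : PySem.Dict Int Int),
    pvBInv land cur vis cnt Q → pvUnl land vis + Q.length ≤ fuel →
    pvBInv land cur (pvBFS land (pvH land) (pvW land) cur fuel Q vis cnt).1
      (pvBFS land (pvH land) (pvW land) cur fuel Q vis cnt).2 [] ∧
    (∀ p ∈ pvU land, pvLab vis p ≠ 0 →
      pvLab (pvBFS land (pvH land) (pvW land) cur fuel Q vis cnt).1 p = pvLab vis p) := by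
  intro fuel
  induction fuel with
  | zero =>
      intro Q vis cnt h hfuel
      cases Q with
      | nil =>
          simp only [pvBFS]
          exact ⟨h, by simp⟩
      | cons hd tl => simp at hfuel
  | succ f ih =>
      intro Q vis cnt h hfuel
      cases Q with
      | nil =>
          simp only [pvBFS]
          exact ⟨h, by simp⟩
      | cons hd tl =>
          obtain ⟨x, y⟩ := hd
          obtain ⟨hsh, hcur, hlabs, hreach, hcnt, hQ, hQnd, hC⟩ := h
          have hxyU : (x, y) ∈ pvU land := (hQ (x, y) (by simp)).1
          have hxylab : pvLab vis (x, y) = cur := (hQ (x, y) (by simp)).2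
          have hxyOil : pvOil land (x, y) :=
            (hlabs (x, y) hxyU (by rw [hxylab]; omega)).1
          have hque : ∀ p ∈ tl, p ∈ pvU land ∧ pvLab vis p = cur :=
            fun p hp => hQ p (List.mem_cons_of_mem _ hp)
          have h0 : pvFoldInv land cur x y tl vis (tl, vis, cnt) := by
            refine ⟨hsh, fun p _ _ => rfl, ?_, fun p hp => Or.inl hp, ?_, fun p hp => hp,
              hcnt, rfl, (List.nodup_cons.mp hQnd).2⟩
            · intro p hp hch; exact absurd rfl hch
            · intro p hp h0 hne; exact absurd h0 hne
          obtain ⟨hF, hnb⟩ := pvDirsFold hxyOil hcur hque pvDirs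
            (fun d hd => hd) _ h0
          set s := pvDirs.foldl (pvBFSStep land (pvH land) (pvW land) cur x y)
            (tl, vis, cnt) with hsdef
          obtain ⟨hsh', hmon, hnew, hqc, hqc2, hqsub, hcnt', hmeas, hnd'⟩ := hF
          -- classification of labels in the new grid
          have hlabcases : ∀ p ∈ pvU land, pvLab s.2.1 p = pvLab vis p ∨
              (pvLab vis p = 0 ∧ pvLab s.2.1 p = cur ∧ pvAdj land (x, y) p) := by
            intro p hp
            by_cases hc : pvLab s.2.1 p = pvLab vis p
            · exact Or.inl hc
            · exact Or.inr (hnew p hp hc)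
          have hBInv' : pvBInv land cur s.2.1 s.2.2 s.1 := by
            refine ⟨hsh', hcur, ?_, ?_, hcnt', ?_, hnd', ?_⟩
            · -- LabsOK
              intro p hp hl
              rcases hlabcases p hp with he | ⟨h0', hcv, hadj⟩
              · rw [he] at hl ⊢
                exact hlabs p hp hl
              · rw [hcv]
                exact ⟨hadj.2.1, by omega, by omega⟩
            · -- ReachOK
              intro p hp q hq hl he
              rcases hlabcases p hp with hep | ⟨hp0, hpc, hpadj⟩ <;>
                rcases hlabcases q hq with heq | ⟨hq0, hqc', hqadj⟩
              · rw [hep] at hl he; rw [heq] at he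
                exact hreach p hp q hq hl he
              · -- q freshly labelled with cur, p has an old label = cur
                rw [hep] at hl he; rw [hqc'] at he
                have : pvReach land p (x, y) :=
                  hreach p hp (x, y) hxyU hl (by rw [he, hxylab])
                exact this.tail hqadj
              · -- p fresh, q old
                rw [hpc] at he hl
                rw [heq] at he
                have h1 : pvReach land p (x, y) :=
                  Relation.ReflTransGen.single (pvAdj_symm hpadj)
                have h2 : pvReach land (x, y) q :=
                  hreach (x, y) hxyU q hq (by rw [hxylab]; omega)
                    (by rw [hxylab, ← he])
                exact h1.trans h2
              · -- both fresh
                exact (Relation.ReflTransGen.single (pvAdj_symm hpadj)).tail hqadj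
            · -- queue members
              intro p hpmem
              rcases hqc p hpmem with hl | ⟨ha, _, hc, _⟩
              · obtain ⟨hU, hlab⟩ := hque p hl
                exact ⟨hU, by rw [hmon p hU (by rw [hlab]; omega), hlab]⟩
              · exact ⟨ha, hc⟩
            · -- ClosedQ
              intro p q hadj hl
              have hpU : p ∈ pvU land := pvOil_mem_pvU hadj.1
              have hqU : q ∈ pvU land := pvOil_mem_pvU hadj.2.1
              rcases hlabcases p hpU with hep | ⟨hp0, hpc, hpadj⟩
              · rw [hep] at hl ⊢
                rcases hC p q hadj hl with hqe | hpQ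
                · left
                  rcases hlabcases q hqU with heq | ⟨hq0, _, _⟩
                  · rw [heq, hqe]
                  · rw [hq0] at hqe; omega
                · rcases List.mem_cons.mp hpQ with rfl | htl
                  · -- p = (x,y): all its neighbours now carry label cur
                    left
                    rw [hxylab]
                    have hadj2 := hadj
                    obtain ⟨_, hqoil, dq, hdq, hqe'⟩ := hadj2
                    have hnz : pvLab s.2.1 q ≠ 0 := by
                      rw [hqe']
                      exact hnb dq hdq (hqe' ▸ hqoil)
                    rcases hlabcases q hqU with heq | ⟨_, hqc', _⟩
                    · rw [heq] at hnz ⊢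
                      rcases hC q (x, y) (pvAdj_symm hadj) hnz with hpe | hqQ
                      · rw [← hpe, hxylab]
                      · rcases List.mem_cons.mp hqQ with rfl | htl'
                        · exact hxylab
                        · exact (hque q htl').2
                    · exact hqc'
                  · exact Or.inr (hqsub p htl)
              · -- p freshly labelled: it is in the new queue
                right
                exact hqc2 p hpU hp0 (by rw [hpc]; omega)
          have hfuel' : pvUnl land s.2.1 + s.1.length ≤ f := by
            simp only [List.length_cons] at hfuel
            omega
          have hrec := ih s.1 s.2.1 s.2.2 hBInv' hfuel'
          have heq : pvBFS land (pvH land) (pvW land) cur (f + 1) ((x, y) :: tl) vis cnt =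
              pvBFS land (pvH land) (pvW land) cur f s.1 s.2.1 s.2.2 := by
            simp only [pvBFS]
            rw [hsdef]
          rw [heq]
          refine ⟨hrec.1, ?_⟩
          intro p hp hl
          rw [hrec.2 p hp (by rw [hmon p hp hl]; exact hl), hmon p hp hl]
-- ---- the row/column scan ----

def pvSInv (land : List (List Int)) (st : List (List Int) × PySem.Dict Int Int × Int) : Prop :=
  pvShaped land st.1 ∧ 0 ≤ st.2.2 ∧ pvLabsOK land st.2.2 st.1 ∧ pvReachOK land st.1 ∧
  pvCntOK land st.2.2 st.1 st.2.1 ∧ pvClosedQ land st.1 []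

def pvCov (land : List (List Int)) (S : Int × Int → Prop) (m : List (List Int)) : Prop :=
  ∀ p ∈ pvU land, S p → pvOil land p → pvLab m p ≠ 0

lemma pvCov_mono {land : List (List Int)} {S S' : Int × Int → Prop} {m : List (List Int)}
    (himp : ∀ p ∈ pvU land, S' p → S p) (h : pvCov land S m) : pvCov land S' m :=
  fun p hp hS' => h p hp (himp p hp hS')

lemma pvScanCell_post {land : List (List Int)} {st} {S : Int × Int → Prop} {i j : Int}
    (h : pvSInv land st) (hcov : pvCov land S st.1)
    (hi : 0 ≤ i) (hiH : i < pvH land) (hj : 0 ≤ j) (hjW : j < pvW land) :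
    pvSInv land (pvScanCell land (pvH land) (pvW land) i st j) ∧
    pvCov land (fun p => S p ∨ p = (i, j)) (pvScanCell land (pvH land) (pvW land) i st j).1 := by
  obtain ⟨hsh, hc0, hlabs, hreach, hcnt, hC⟩ := h
  have hijU : (i, j) ∈ pvU land := mem_pvU.mpr ⟨hi, hiH, hj, hjW⟩
  by_cases hgd : (pvG land i j ≠ 0 ∧ pvG st.1 i j = 0)
  · simp only [pvScanCell, if_pos hgd]
    have hOilij : pvOil land (i, j) := ⟨hi, hiH, hj, hjW, hgd.1⟩
    have hlab0 : pvLab st.1 (i, j) = 0 := hgd.2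
    set cur' : Int := st.2.2 + 1 with hcur'
    set vis1 := pvSet2 st.1 i j cur' with hvis1
    set cnt1 := st.2.1.insert cur' 1 with hcnt1
    have hlab1 : ∀ p ∈ pvU land,
        pvLab vis1 p = if p = (i, j) then cur' else pvLab st.1 p :=
      fun p hp => pvLab_set2 hsh hijU hp
    have hBInv : pvBInv land cur' vis1 cnt1 [(i, j)] := by
      refine ⟨pvShaped_set2 hsh hi hiH, by omega, ?_, ?_, ?_, ?_, List.nodup_singleton _, ?_⟩
      · -- LabsOK
        intro p hp hl
        rw [hlab1 p hp] at hl ⊢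
        by_cases hpn : p = (i, j)
        · rw [if_pos hpn] at hl ⊢
          exact ⟨hpn ▸ hOilij, by omega, by omega⟩
        · rw [if_neg hpn] at hl ⊢
          obtain ⟨ho, hb1, hb2⟩ := hlabs p hp hl
          exact ⟨ho, hb1, by omega⟩
      · -- ReachOK
        intro p hp q hq hl he
        rw [hlab1 p hp] at hl he
        rw [hlab1 q hq] at he
        by_cases hpn : p = (i, j) <;> by_cases hqn : q = (i, j)
        · subst hpn; subst hqn; exact Relation.ReflTransGen.refl
        · rw [if_pos hpn] at he hl
          rw [if_neg hqn] at he
          have hq0 : pvLab st.1 q ≠ 0 := by omega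
          have := (hlabs q hq hq0).2.2
          omega
        · rw [if_neg hpn] at he hl
          rw [if_pos hqn] at he
          have := (hlabs p hp hl).2.2
          omega
        · rw [if_neg hpn] at he hl
          rw [if_neg hqn] at he
          exact hreach p hp q hq hl he
      · -- counts
        intro r hr1 hr2
        rw [hcnt1, PySem.Dict.getD_insert]
        by_cases hrc : r = cur'
        · rw [if_pos hrc]
          have hset : (pvU land).filter (fun p => pvLab vis1 p = r) = {(i, j)} := by
            ext q
            simp only [Finset.mem_filter, Finset.mem_singleton]
            constructor
            · rintro ⟨hqU, hql⟩
              rw [hlab1 q hqU] at hql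
              by_cases hqn : q = (i, j)
              · exact hqn
              · rw [if_neg hqn] at hql
                have hq0 : pvLab st.1 q ≠ 0 := by omega
                have := (hlabs q hqU hq0).2.2
                omega
            · rintro rfl
              exact ⟨hijU, by rw [hlab1 _ hijU, if_pos rfl, hrc]⟩
          rw [hset]
          simp
        · rw [if_neg hrc]
          have hr2' : r ≤ st.2.2 := by omega
          rw [hcnt r hr1 hr2']
          have hset : (pvU land).filter (fun p => pvLab vis1 p = r) =
              (pvU land).filter (fun p => pvLab st.1 p = r) := by
            ext q
            simp only [Finset.mem_filter]
            constructor
            · rintro ⟨hqU, hql⟩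
              rw [hlab1 q hqU] at hql
              by_cases hqn : q = (i, j)
              · rw [if_pos hqn] at hql; exact absurd hql.symm hrc
              · rw [if_neg hqn] at hql; exact ⟨hqU, hql⟩
            · rintro ⟨hqU, hql⟩
              refine ⟨hqU, ?_⟩
              rw [hlab1 q hqU,
                if_neg (by rintro rfl; rw [hlab0] at hql; omega)]
              exact hql
          rw [hset]
      · -- queue members
        intro p hp
        rw [List.mem_singleton.mp hp]
        exact ⟨hijU, by rw [hlab1 _ hijU, if_pos rfl]⟩
      · -- ClosedQ
        intro p q hadj hl
        have hpU : p ∈ pvU land := pvOil_mem_pvU hadj.1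
        have hqU : q ∈ pvU land := pvOil_mem_pvU hadj.2.1
        by_cases hpn : p = (i, j)
        · right; rw [hpn]; simp
        · left
          rw [hlab1 p hpU, if_neg hpn] at hl ⊢
          rcases hC p q hadj hl with he | hmem
          · have hqn : q ≠ (i, j) := by
              rintro rfl
              rw [hlab0] at he
              exact hl he.symm
            rw [hlab1 q hqU, if_neg hqn]
            exact he
          · cases hmem
    have hfuel : pvUnl land vis1 + ([((i : Int), (j : Int))] : List (Int × Int)).length ≤
        (pvH land * pvW land).toNat + 1 := by
      have h1 : pvUnl land vis1 ≤ (pvU land).card :=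
        Finset.card_le_card (Finset.filter_subset _ _)
      rw [pvU_card] at h1
      simp only [List.length_singleton]
      omega
    obtain ⟨hB', hmono⟩ := pvBFS_post ((pvH land * pvW land).toNat + 1) [(i, j)] vis1 cnt1
      hBInv hfuel
    obtain ⟨hsh', hcur'', hlabs', hreach', hcnt', _, _, hC'⟩ := hB'
    refine ⟨⟨hsh', by show (0:Int) ≤ cur'; omega, hlabs', hreach', hcnt', hC'⟩, ?_⟩
    intro p hp hS hOil
    rcases hS with hS | rfl
    · have h1 : pvLab st.1 p ≠ 0 := hcov p hp hS hOil
      have hpn : p ≠ (i, j) := by rintro rfl; exact h1 hlab0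
      have h2 : pvLab vis1 p ≠ 0 := by rw [hlab1 p hp, if_neg hpn]; exact h1
      rw [hmono p hp h2]
      exact h2
    · have h2 : pvLab vis1 (i, j) ≠ 0 := by
        rw [hlab1 _ hijU, if_pos rfl]; omega
      rw [hmono _ hijU h2]
      exact h2
  · simp only [pvScanCell, if_neg hgd]
    refine ⟨⟨hsh, hc0, hlabs, hreach, hcnt, hC⟩, ?_⟩
    intro p hp hS hOil
    rcases hS with hS | rfl
    · exact hcov p hp hS hOil
    · intro hcon
      exact hgd ⟨hOil.2.2.2.2, hcon⟩

lemma pvScanRow {land : List (List Int)} {i : Int}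
    (hi : 0 ≤ i) (hiH : i < pvH land) :
    ∀ (js : List Int), (∀ j ∈ js, 0 ≤ j ∧ j < pvW land) →
    ∀ st (S : Int × Int → Prop), pvSInv land st → pvCov land S st.1 →
    pvSInv land (js.foldl (pvScanCell land (pvH land) (pvW land) i) st) ∧
    pvCov land (fun p => S p ∨ (p.1 = i ∧ p.2 ∈ js))
      (js.foldl (pvScanCell land (pvH land) (pvW land) i) st).1 := by
  intro js
  induction js with
  | nil =>
      intro _ st S hS hcov
      refine ⟨hS, pvCov_mono ?_ hcov⟩
      rintro p _ (h | ⟨_, h⟩)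
      · exact h
      · cases h
  | cons j js ih =>
      intro hjs st S hS hcov
      obtain ⟨h1, h2⟩ := pvScanCell_post hS hcov hi hiH (hjs j (by simp)).1 (hjs j (by simp)).2
      obtain ⟨h3, h4⟩ := ih (fun e he => hjs e (List.mem_cons_of_mem _ he)) _ _ h1 h2
      refine ⟨h3, pvCov_mono ?_ h4⟩
      rintro p _ (h | ⟨hpi, hpj⟩)
      · exact Or.inl (Or.inl h)
      · rcases List.mem_cons.mp hpj with rfl | hmem
      -- wait: hpj : p.2 ∈ j :: js
        · exact Or.inl (Or.inr (by cases p; simp_all))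
        · exact Or.inr ⟨hpi, hmem⟩

lemma pvScanRows {land : List (List Int)} :
    ∀ (is : List Int), (∀ i ∈ is, 0 ≤ i ∧ i < pvH land) →
    ∀ st (S : Int × Int → Prop), pvSInv land st → pvCov land S st.1 →
    pvSInv land (is.foldl (fun st i => (PySem.List.pyRange 0 (pvW land) 1).foldl
      (pvScanCell land (pvH land) (pvW land) i) st) st) ∧
    pvCov land (fun p => S p ∨ (p.1 ∈ is ∧ 0 ≤ p.2 ∧ p.2 < pvW land))
      (is.foldl (fun st i => (PySem.List.pyRange 0 (pvW land) 1).foldl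
        (pvScanCell land (pvH land) (pvW land) i) st) st).1 := by
  intro is
  induction is with
  | nil =>
      intro _ st S hS hcov
      refine ⟨hS, pvCov_mono ?_ hcov⟩
      rintro p _ (h | ⟨h, _⟩)
      · exact h
      · cases h
  | cons i is ih =>
      intro his st S hS hcov
      obtain ⟨h1, h2⟩ := pvScanRow (his i (by simp)).1 (his i (by simp)).2
        (PySem.List.pyRange 0 (pvW land) 1)
        (fun j hj => by
          rw [PySem.List.mem_pyRange_one] at hj
          exact hj)
        st S hS hcov
      obtain ⟨h3, h4⟩ := ih (fun e he => his e (List.mem_cons_of_mem _ he)) _ _ h1 h2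
      refine ⟨h3, pvCov_mono ?_ h4⟩
      rintro p _ (h | ⟨hpi, hpj⟩)
      · exact Or.inl (Or.inl h)
      · rcases List.mem_cons.mp hpi with hpi' | hmem
        · exact Or.inl (Or.inr ⟨hpi', PySem.List.mem_pyRange_one.mpr ⟨hpj.1, hpj.2⟩⟩)
        · exact Or.inr ⟨hmem, hpj⟩

lemma pvScan_post (land : List (List Int)) :
    pvSInv land ((PySem.List.pyRange 0 (pvH land) 1).foldl
      (fun st i => (PySem.List.pyRange 0 (pvW land) 1).foldl
        (pvScanCell land (pvH land) (pvW land) i) st)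
      (List.replicate (pvH land).toNat (List.replicate (pvW land).toNat 0),
        PySem.Dict.empty, 0)) ∧
    pvCov land (fun _ => True) ((PySem.List.pyRange 0 (pvH land) 1).foldl
      (fun st i => (PySem.List.pyRange 0 (pvW land) 1).foldl
        (pvScanCell land (pvH land) (pvW land) i) st)
      (List.replicate (pvH land).toNat (List.replicate (pvW land).toNat 0),
        PySem.Dict.empty, 0)).1 := by
  have hS0 : pvSInv land (List.replicate (pvH land).toNat
      (List.replicate (pvW land).toNat 0), PySem.Dict.empty, (0 : Int)) := by
    refine ⟨pvShaped_replicate land, le_refl _, ?_, ?_, ?_, ?_⟩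
    · intro p _ hl; exact absurd pvLab_replicate hl
    · intro p _ q _ hl _; exact absurd pvLab_replicate hl
    · intro r hr1 hr2
      simp only at hr2
      omega
    · intro p q _ hl; exact absurd pvLab_replicate hl
  obtain ⟨h1, h2⟩ := pvScanRows (PySem.List.pyRange 0 (pvH land) 1)
    (fun i hi => by rw [PySem.List.mem_pyRange_one] at hi; exact hi)
    _ (fun _ => False) hS0 (fun p _ h _ => absurd h (by simp))
  refine ⟨h1, pvCov_mono ?_ h2⟩
  intro p hp _
  obtain ⟨hb1, hb2, hb3, hb4⟩ := mem_pvU.mp hp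
  exact Or.inr ⟨PySem.List.mem_pyRange_one.mpr ⟨hb1, hb2⟩, hb3, hb4⟩

-- ---- A's per-column value = card of the reachable-from-column set ----

lemma pvLab_const_of_reach {land : List (List Int)} {vis : List (List Int)}
    (hC : pvClosedQ land vis []) {p q : Int × Int} (h : pvReach land p q)
    (hp : pvLab vis p ≠ 0) : pvLab vis q = pvLab vis p := by
  induction h with
  | refl => rfl
  | tail hstep e ih =>
      rcases hC _ _ e (by rw [ih]; exact hp) with he | hmem
      · rw [he, ih]
      · cases hmem

lemma pvColA_card {land : List (List Int)} {st} (hS : pvSInv land st)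
    (hcov : pvCov land (fun _ => True) st.1) {w : Int} (hw : 0 ≤ w) (hwW : w < pvW land) :
    pvColSum st.2.1 (pvColLabels st.1 (pvH land) w) =
      (((pvU land).filter (fun p =>
        pvLab st.1 p ∈ pvColLabels st.1 (pvH land) w)).card : Int) ∧
    ∀ p, (p ∈ pvU land ∧ pvLab st.1 p ∈ pvColLabels st.1 (pvH land) w) ↔
      (p ∈ pvU land ∧ pvRCset land w p) := by
  obtain ⟨hsh, hc0, hlabs, hreach, hcnt, hC⟩ := hS
  have hLdef : pvColLabels st.1 (pvH land) w =
      PySem.Set.ofList (((PySem.List.pyRange 0 (pvH land) 1).filter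
        (fun h => decide (pvG st.1 h w ≠ 0))).map (fun h => pvG st.1 h w)) := by
    rw [pvColLabels,
      PySem.List.foldl_ite_eq_foldl_filter (fun h => pvG st.1 h w ≠ 0)
        (fun res h => PySem.Set.add res (pvG st.1 h w)),
      ← PySem.Set.update_map_eq_foldl_add, PySem.Set.update_empty]
  have hmem : ∀ r, r ∈ pvColLabels st.1 (pvH land) w ↔
      ∃ h : Int, 0 ≤ h ∧ h < pvH land ∧ pvG st.1 h w ≠ 0 ∧ pvG st.1 h w = r := by
    intro r
    rw [hLdef, PySem.Set.mem_ofList]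
    simp only [List.mem_map, List.mem_filter, PySem.List.mem_pyRange_one, decide_eq_true_eq]
    constructor
    · rintro ⟨h, ⟨⟨hb1, hb2⟩, hb3⟩, hb4⟩
      exact ⟨h, hb1, hb2, hb3, hb4⟩
    · rintro ⟨h, hb1, hb2, hb3, hb4⟩
      exact ⟨h, ⟨⟨hb1, hb2⟩, hb3⟩, hb4⟩
  have hnodup : (pvColLabels st.1 (pvH land) w).Nodup := by
    rw [hLdef]; exact PySem.Set.nodup_ofList _
  have hbounds : ∀ r ∈ pvColLabels st.1 (pvH land) w, 1 ≤ r ∧ r ≤ st.2.2 := by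
    intro r hr
    obtain ⟨h, hb1, hb2, hb3, hb4⟩ := (hmem r).mp hr
    have hhU : ((h : Int), w) ∈ pvU land := mem_pvU.mpr ⟨hb1, hb2, hw, hwW⟩
    have : pvLab st.1 (h, w) ≠ 0 := by
      show pvG st.1 h w ≠ 0
      exact hb3
    obtain ⟨_, hx1, hx2⟩ := hlabs _ hhU this
    have : pvLab st.1 (h, w) = r := hb4
    constructor <;> omega
  constructor
  · -- the sum of counts is the cardinality of the union of the classes
    rw [pvColSum, PySem.List.foldl_add, zero_add,
      ← List.sum_toFinset _ hnodup]
    have hstep1 : ∀ r ∈ (pvColLabels st.1 (pvH land) w).toFinset,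
        st.2.1.getD r 0 =
          ((((pvU land).filter (fun p => pvLab st.1 p = r))).card : Int) := by
      intro r hr
      have := hbounds r (List.mem_toFinset.mp hr)
      exact hcnt r this.1 this.2
    rw [Finset.sum_congr rfl hstep1]
    have hfib := Finset.card_eq_sum_card_fiberwise
      (f := pvLab st.1)
      (s := (pvU land).filter (fun p => pvLab st.1 p ∈ pvColLabels st.1 (pvH land) w))
      (t := (pvColLabels st.1 (pvH land) w).toFinset)
      (by
        intro p hp
        simp only [Finset.coe_filter, Set.mem_setOf_eq] at hp
        exact List.mem_toFinset.mpr hp.2)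
    have hper : ∀ b ∈ (pvColLabels st.1 (pvH land) w).toFinset,
        (((pvU land).filter (fun p => pvLab st.1 p ∈ pvColLabels st.1 (pvH land) w)).filter
          (fun p => pvLab st.1 p = b)).card =
        ((pvU land).filter (fun p => pvLab st.1 p = b)).card := by
      intro b hb
      congr 1
      rw [Finset.filter_filter]
      apply Finset.filter_congr
      intro p _
      constructor
      · rintro ⟨_, h2⟩; exact h2
      · rintro h2; exact ⟨h2 ▸ List.mem_toFinset.mp hb, h2⟩
    rw [Finset.sum_congr rfl hper] at hfib
    norm_cast
    exact hfib.symm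
  · -- the labelled union is exactly the set reachable from column w
    intro p
    constructor
    · rintro ⟨hpU, hmemL⟩
      obtain ⟨h, hb1, hb2, hb3, hb4⟩ := (hmem _).mp hmemL
      have hhU : ((h : Int), w) ∈ pvU land := mem_pvU.mpr ⟨hb1, hb2, hw, hwW⟩
      have hlq : pvLab st.1 (h, w) ≠ 0 := hb3
      have hoilq : pvOil land (h, w) := (hlabs _ hhU hlq).1
      refine ⟨hpU, (h, w), rfl, hoilq, ?_⟩
      exact hreach _ hhU p hpU hlq hb4
    · rintro ⟨hpU, q, hqw, hqoil, hqreach⟩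
      have hqU : q ∈ pvU land := pvOil_mem_pvU hqoil
      have hpOil : pvOil land p := pvReach_oil hqreach hqoil
      have hlq : pvLab st.1 q ≠ 0 := hcov q hqU trivial hqoil
      have hlp : pvLab st.1 p = pvLab st.1 q := pvLab_const_of_reach hC hqreach hlq
      refine ⟨hpU, ?_⟩
      rw [hmem]
      refine ⟨q.1, hqoil.1, hqoil.2.1, ?_, ?_⟩
      · show pvLab st.1 (q.1, w) ≠ 0
        rwa [show ((q.1 : Int), w) = q from by rw [← hqw]]
      · show pvLab st.1 (q.1, w) = pvLab st.1 p
        rw [show ((q.1 : Int), w) = q from by rw [← hqw], hlp]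
-- ---- B's per-column flood: invariant and postcondition ----

def pvGrowInv (land : List (List Int)) (w : Int) (cells : PySem.Set (Int × Int))
    (frontier : List (Int × Int)) : Prop :=
  cells.Nodup ∧ (∀ p ∈ frontier, p ∈ cells) ∧
  (∀ p ∈ cells, pvOil land p ∧ pvRCset land w p) ∧
  (∀ p ∈ cells, p ∉ frontier → ∀ q, pvAdj land p q → q ∈ cells) ∧
  (∀ q : Int × Int, q.2 = w → pvOil land q → q ∈ cells)

noncomputable def pvUcard (land : List (List Int)) (cells : PySem.Set (Int × Int)) : Nat :=
  (((pvU land).filter (fun p => p ∉ cells))).card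

lemma pvReach_closed {land : List (List Int)} {cells : PySem.Set (Int × Int)}
    (hcl : ∀ a ∈ cells, ∀ b, pvAdj land a b → b ∈ cells) {q p : Int × Int}
    (h : pvReach land q p) (hq : q ∈ cells) : p ∈ cells := by
  induction h with
  | refl => exact hq
  | tail _ e ih => exact hcl _ ih _ e

lemma pvGrowInv_final {land : List (List Int)} {w : Int} {cells : PySem.Set (Int × Int)}
    (h : pvGrowInv land w cells []) :
    cells.Nodup ∧ ∀ p, p ∈ cells ↔ p ∈ pvU land ∧ pvRCset land w p := by
  obtain ⟨hnd, _, hmem, hcl, hseed⟩ := h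
  refine ⟨hnd, fun p => ⟨?_, ?_⟩⟩
  · intro hp
    obtain ⟨ho, hrc⟩ := hmem p hp
    exact ⟨pvOil_mem_pvU ho, hrc⟩
  · rintro ⟨hpU, q, hqw, hqoil, hqreach⟩
    exact pvReach_closed (fun a ha b hab => hcl a ha (by simp) b hab) hqreach
      (hseed q hqw hqoil)

-- the state of one saturation round relative to its start (cells0, oldfr)
def pvRInv (land : List (List Int)) (cells0 : PySem.Set (Int × Int))
    (oldfr : List (Int × Int)) (s : PySem.Set (Int × Int) × List (Int × Int)) : Prop :=
  s.1.Nodup ∧ (∀ p ∈ cells0, p ∈ s.1) ∧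
  (∀ p ∈ s.1, p ∈ cells0 ∨ (pvOil land p ∧ ∃ f ∈ oldfr, pvAdj land f p)) ∧
  (∀ p : Int × Int, p ∈ s.2 ↔ (p ∈ s.1 ∧ p ∉ cells0))

lemma pvGrowStep_sub {land : List (List Int)} {p : Int × Int} {s} {d : Int × Int}
    {q : Int × Int} (hq : q ∈ s.1) :
    q ∈ (pvGrowStep land (pvH land) (pvW land) p s d).1 := by
  by_cases hgd : (0 ≤ p.1 + d.1 ∧ p.1 + d.1 < pvH land ∧ 0 ≤ p.2 + d.2 ∧
      p.2 + d.2 < pvW land ∧ pvG land (p.1 + d.1) (p.2 + d.2) ≠ 0 ∧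
      ¬ (p.1 + d.1, p.2 + d.2) ∈ s.1)
  · simp only [pvGrowStep, if_pos hgd]
    exact (PySem.Set.mem_add _ _ _).mpr (Or.inl hq)
  · simp only [pvGrowStep, if_neg hgd]
    exact hq

lemma pvGrowDirsFold_sub {land : List (List Int)} {p : Int × Int} :
    ∀ (ds : List (Int × Int)) (s) {q : Int × Int}, q ∈ s.1 →
    q ∈ (ds.foldl (pvGrowStep land (pvH land) (pvW land) p) s).1 := by
  intro ds
  induction ds with
  | nil => intro s q hq; exact hq
  | cons d ds ih => intro s q hq; exact ih _ (pvGrowStep_sub hq)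

lemma pvGrowStep_inv {land : List (List Int)} {cells0 : PySem.Set (Int × Int)}
    {oldfr : List (Int × Int)} {p : Int × Int} {s} {d : Int × Int}
    (hd : d ∈ pvDirs) (hpOil : pvOil land p) (hpfr : p ∈ oldfr)
    (h : pvRInv land cells0 oldfr s) :
    pvRInv land cells0 oldfr (pvGrowStep land (pvH land) (pvW land) p s d) := by
  obtain ⟨hnd, hsub, hmem, hiff⟩ := h
  by_cases hgd : (0 ≤ p.1 + d.1 ∧ p.1 + d.1 < pvH land ∧ 0 ≤ p.2 + d.2 ∧
      p.2 + d.2 < pvW land ∧ pvG land (p.1 + d.1) (p.2 + d.2) ≠ 0 ∧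
      ¬ (p.1 + d.1, p.2 + d.2) ∈ s.1)
  · simp only [pvGrowStep, if_pos hgd]
    obtain ⟨h1, h2, h3, h4, h5, h6⟩ := hgd
    set n : Int × Int := (p.1 + d.1, p.2 + d.2) with hn
    have hnOil : pvOil land n := ⟨h1, h2, h3, h4, h5⟩
    have hAdj : pvAdj land p n := ⟨hpOil, hnOil, d, hd, rfl⟩
    have hadd : PySem.Set.add s.1 n = s.1 ++ [n] := PySem.Set.add_of_not_mem h6
    have hn0 : n ∉ cells0 := fun hc => h6 (hsub n hc)
    refine ⟨?_, ?_, ?_, ?_⟩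
    · rw [hadd]
      refine List.nodup_append.mpr ⟨hnd, List.nodup_singleton _, ?_⟩
      intro a ha b hb
      rw [List.mem_singleton.mp hb]
      rintro rfl
      exact h6 ha
    · intro q hq
      rw [hadd]
      exact List.mem_append_left _ (hsub q hq)
    · intro q hq
      rw [hadd] at hq
      rcases List.mem_append.mp hq with hq' | hq'
      · exact hmem q hq'
      · rw [List.mem_singleton.mp hq']
        exact Or.inr ⟨hnOil, p, hpfr, hAdj⟩
    · intro q
      rw [hadd]
      simp only [List.mem_append, List.mem_singleton]
      constructor
      · rintro (hq' | rfl)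
        · obtain ⟨ha, hb⟩ := (hiff q).mp hq'
          exact ⟨Or.inl ha, hb⟩
        · exact ⟨Or.inr rfl, hn0⟩
      · rintro ⟨hq' | rfl, hb⟩
        · exact Or.inl ((hiff q).mpr ⟨hq', hb⟩)
        · exact Or.inr rfl
  · simp only [pvGrowStep, if_neg hgd]
    exact ⟨hnd, hsub, hmem, hiff⟩

lemma pvGrowDirs {land : List (List Int)} {cells0 : PySem.Set (Int × Int)}
    {oldfr : List (Int × Int)} {p : Int × Int}
    (hpOil : pvOil land p) (hpfr : p ∈ oldfr) :
    ∀ (ds : List (Int × Int)), (∀ d ∈ ds, d ∈ pvDirs) → ∀ s,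
    pvRInv land cells0 oldfr s →
    pvRInv land cells0 oldfr (ds.foldl (pvGrowStep land (pvH land) (pvW land) p) s) ∧
    (∀ d ∈ ds, pvOil land (p.1 + d.1, p.2 + d.2) →
      (p.1 + d.1, p.2 + d.2) ∈
        (ds.foldl (pvGrowStep land (pvH land) (pvW land) p) s).1) := by
  intro ds
  induction ds with
  | nil => intro _ s h; exact ⟨h, by simp⟩
  | cons d ds ih =>
      intro hds s h
      have hstep := pvGrowStep_inv (hds d (by simp)) hpOil hpfr h
      obtain ⟨hfin, hrest⟩ := ih (fun e he => hds e (List.mem_cons_of_mem _ he)) _ hstep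
      refine ⟨hfin, ?_⟩
      intro e he hoil
      rcases List.mem_cons.mp he with rfl | he'
      · apply pvGrowDirsFold_sub ds (pvGrowStep land (pvH land) (pvW land) p s e)
        by_cases hgd : (0 ≤ p.1 + e.1 ∧ p.1 + e.1 < pvH land ∧ 0 ≤ p.2 + e.2 ∧
            p.2 + e.2 < pvW land ∧ pvG land (p.1 + e.1) (p.2 + e.2) ≠ 0 ∧
            ¬ (p.1 + e.1, p.2 + e.2) ∈ s.1)
        · simp only [pvGrowStep, if_pos hgd]
          exact (PySem.Set.mem_add _ _ _).mpr (Or.inr rfl)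
        · have hin : (p.1 + e.1, p.2 + e.2) ∈ s.1 := by
            obtain ⟨o1, o2, o3, o4, o5⟩ := hoil
            by_contra hcon
            exact hgd ⟨o1, o2, o3, o4, o5, hcon⟩
          simp only [pvGrowStep, if_neg hgd]
          exact hin
      · exact hrest e he' hoil

lemma pvGrowRound_sub {land : List (List Int)} :
    ∀ (fr : List (Int × Int)) (s) {q : Int × Int}, q ∈ s.1 →
    q ∈ (fr.foldl (fun s p => pvDirs.foldl (pvGrowStep land (pvH land) (pvW land) p) s) s).1 := by
  intro fr
  induction fr with
  | nil => intro s q hq; exact hq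
  | cons p fr ih => intro s q hq; exact ih _ (pvGrowDirsFold_sub pvDirs _ hq)

lemma pvGrowRound {land : List (List Int)} {cells0 : PySem.Set (Int × Int)}
    {oldfr : List (Int × Int)} (hfr : ∀ p ∈ oldfr, pvOil land p) :
    ∀ (fr : List (Int × Int)), (∀ p ∈ fr, p ∈ oldfr) → ∀ s,
    pvRInv land cells0 oldfr s →
    pvRInv land cells0 oldfr
      (fr.foldl (fun s p => pvDirs.foldl (pvGrowStep land (pvH land) (pvW land) p) s) s) ∧
    (∀ p ∈ fr, ∀ q, pvAdj land p q →
      q ∈ (fr.foldl (fun s p =>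
        pvDirs.foldl (pvGrowStep land (pvH land) (pvW land) p) s) s).1) := by
  intro fr
  induction fr with
  | nil => intro _ s h; exact ⟨h, by simp⟩
  | cons p fr ih =>
      intro hmem s h
      have hpOil : pvOil land p := hfr p (hmem p (by simp))
      obtain ⟨hd1, hd2⟩ := pvGrowDirs hpOil (hmem p (by simp)) pvDirs (fun d hd => hd) s h
      obtain ⟨hfin, hrest⟩ := ih (fun e he => hmem e (List.mem_cons_of_mem _ he)) _ hd1
      refine ⟨hfin, ?_⟩
      intro e he q hq
      rcases List.mem_cons.mp he with rfl | he'
      · apply pvGrowRound_sub fr (pvDirs.foldl (pvGrowStep land (pvH land) (pvW land) e) s)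
        obtain ⟨_, hqoil, dq, hdq, hqe⟩ := hq
        rw [hqe]
        exact hd2 dq hdq (hqe ▸ hqoil)
      · exact hrest e he' q hq

lemma pvGrow_post {land : List (List Int)} {w : Int} :
    ∀ (fuel : Nat) (cells : PySem.Set (Int × Int)) (frontier : List (Int × Int)),
    pvGrowInv land w cells frontier →
    (frontier ≠ [] → pvUcard land cells + 1 ≤ fuel) →
    (pvGrow land (pvH land) (pvW land) fuel cells frontier).Nodup ∧
    (∀ p, p ∈ pvGrow land (pvH land) (pvW land) fuel cells frontier ↔
      p ∈ pvU land ∧ pvRCset land w p) := by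
  intro fuel
  induction fuel with
  | zero =>
      intro cells frontier h hf
      cases frontier with
      | nil =>
          simp only [pvGrow]
          exact pvGrowInv_final h
      | cons hd tl =>
          exact absurd (hf (by simp)) (by omega)
  | succ f ih =>
      intro cells frontier h hf
      cases frontier with
      | nil =>
          simp only [pvGrow]
          exact pvGrowInv_final h
      | cons hd tl =>
          obtain ⟨hnd, hfsub, hmem, hcl, hseed⟩ := h
          have hfr : ∀ p ∈ hd :: tl, pvOil land p :=
            fun p hp => (hmem p (hfsub p hp)).1
          have hR0 : pvRInv land cells (hd :: tl) (cells, ([] : List (Int × Int))) := by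
            refine ⟨hnd, fun p hp => hp, fun p hp => Or.inl hp, ?_⟩
            intro p
            simp only [List.not_mem_nil, false_iff, not_and, not_not]
            intro hp; exact hp
          obtain ⟨hR, hclfr⟩ := pvGrowRound hfr (hd :: tl) (fun p hp => hp) _ hR0
          obtain ⟨hnd', hsub', hmem', hiff'⟩ := hR
          simp only [pvGrow]
          set s := (hd :: tl).foldl
            (fun s p => pvDirs.foldl (pvGrowStep land (pvH land) (pvW land) p) s)
            (cells, ([] : List (Int × Int))) with hsdef
          have hGI' : pvGrowInv land w s.1 s.2 := by
            refine ⟨hnd', fun p hp => ((hiff' p).mp hp).1, ?_, ?_, ?_⟩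
            · intro p hp
              rcases hmem' p hp with hold | ⟨hoil, f, hffr, hadj⟩
              · exact hmem p hold
              · obtain ⟨q0, hq0w, hq0oil, hq0r⟩ := (hmem f (hfsub f hffr)).2
                exact ⟨hoil, q0, hq0w, hq0oil, hq0r.tail hadj⟩
            · intro p hp hpnfr q hadj
              have hpc : p ∈ cells := by
                by_contra hcon
                exact hpnfr ((hiff' p).mpr ⟨hp, hcon⟩)
              by_cases hpf : p ∈ hd :: tl
              · exact hclfr p hpf q hadj
              · exact hsub' q (hcl p hpc hpf q hadj)
            · intro q hqw hqoil
              exact hsub' q (hseed q hqw hqoil)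
          refine ih s.1 s.2 hGI' ?_
          intro hne
          obtain ⟨p0, hp0⟩ := List.exists_mem_of_ne_nil _ hne
          obtain ⟨hp0in, hp0nc⟩ := (hiff' p0).mp hp0
          have hp0U : p0 ∈ pvU land := by
            rcases hmem' p0 hp0in with hold | ⟨hoil, _⟩
            · exact absurd hold hp0nc
            · exact pvOil_mem_pvU hoil
          have hlt : pvUcard land s.1 < pvUcard land cells := by
            apply Finset.card_lt_card
            rw [Finset.ssubset_iff_of_subset]
            · exact ⟨p0, by simp only [Finset.mem_filter]; exact ⟨hp0U, hp0nc⟩,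
                by simp only [Finset.mem_filter, not_and, not_not]; intro _; exact hp0in⟩
            · intro q hq
              simp only [Finset.mem_filter] at hq ⊢
              exact ⟨hq.1, fun hcon => hq.2 (hsub' q hcon)⟩
          have := hf (by simp)
          omega

lemma pvColInit_spec {land : List (List Int)} {w : Int} (hw : 0 ≤ w) (hwW : w < pvW land) :
    pvGrowInv land w (pvColInit land (pvH land) w).1 (pvColInit land (pvH land) w).2 ∧
    ((pvColInit land (pvH land) w).2 ≠ [] →
      pvUcard land (pvColInit land (pvH land) w).1 + 1 ≤ (pvH land * pvW land).toNat) := by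
  have hinit : pvColInit land (pvH land) w =
      (PySem.Set.ofList (((PySem.List.pyRange 0 (pvH land) 1).filter
          (fun i => decide (pvG land i w ≠ 0))).map (fun i => ((i : Int), w))),
        ((PySem.List.pyRange 0 (pvH land) 1).filter
          (fun i => decide (pvG land i w ≠ 0))).map (fun i => ((i : Int), w))) := by
    rw [pvColInit,
      PySem.List.foldl_ite_eq_foldl_filter (fun i => pvG land i w ≠ 0)
        (fun s i => (PySem.Set.add s.1 (i, w), s.2 ++ [(i, w)])),
      PySem.List.foldl_prod_mk (f := fun s1 i => PySem.Set.add s1 (i, w))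
        (g := fun s2 i => s2 ++ [(i, w)]),
      ← PySem.Set.update_map_eq_foldl_add, PySem.Set.update_empty,
      PySem.List.foldl_append_singleton_eq_map, List.nil_append]
  have hndseeds : (((PySem.List.pyRange 0 (pvH land) 1).filter
      (fun i => decide (pvG land i w ≠ 0))).map (fun i => ((i : Int), w))).Nodup := by
    refine List.Nodup.map ?_ ((PySem.List.nodup_pyRange_one 0 (pvH land)).filter _)
    intro a b hab
    simpa using congrArg Prod.fst hab
  have hofl : PySem.Set.ofList (((PySem.List.pyRange 0 (pvH land) 1).filter
      (fun i => decide (pvG land i w ≠ 0))).map (fun i => ((i : Int), w))) =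
      (((PySem.List.pyRange 0 (pvH land) 1).filter
        (fun i => decide (pvG land i w ≠ 0))).map (fun i => ((i : Int), w))) :=
    PySem.Set.ofList_eq_self_of_nodup _ hndseeds
  rw [hinit, hofl]
  set seeds := (((PySem.List.pyRange 0 (pvH land) 1).filter
    (fun i => decide (pvG land i w ≠ 0))).map (fun i => ((i : Int), w))) with hseeds
  have hsmem : ∀ p : Int × Int, p ∈ seeds ↔
      (0 ≤ p.1 ∧ p.1 < pvH land ∧ pvG land p.1 w ≠ 0 ∧ p.2 = w) := by
    intro p
    rw [hseeds]
    simp only [List.mem_map, List.mem_filter, PySem.List.mem_pyRange_one, decide_eq_true_eq]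
    constructor
    · rintro ⟨i, ⟨⟨hb1, hb2⟩, hb3⟩, rfl⟩
      exact ⟨hb1, hb2, hb3, rfl⟩
    · rintro ⟨hb1, hb2, hb3, hb4⟩
      exact ⟨p.1, ⟨⟨hb1, hb2⟩, hb3⟩, by rw [← hb4]⟩
  have hoilmem : ∀ p ∈ seeds, pvOil land p := by
    intro p hp
    obtain ⟨hb1, hb2, hb3, hb4⟩ := (hsmem p).mp hp
    exact ⟨hb1, hb2, by omega, by omega, by rw [hb4]; exact hb3⟩
  constructor
  · refine ⟨hndseeds, fun p hp => hp, ?_, ?_, ?_⟩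
    · intro p hp
      have hoil := hoilmem p hp
      exact ⟨hoil, p, ((hsmem p).mp hp).2.2.2, hoil, Relation.ReflTransGen.refl⟩
    · intro p hp hpn
      exact absurd hp hpn
    · intro q hqw hqoil
      rw [hsmem]
      exact ⟨hqoil.1, hqoil.2.1, by rw [← hqw]; exact hqoil.2.2.2.2, hqw⟩
  · intro hne
    show pvUcard land seeds + 1 ≤ (pvH land * pvW land).toNat
    obtain ⟨p0, hp0⟩ := List.exists_mem_of_ne_nil _ hne
    have hp0' : p0 ∈ seeds := hp0
    have hp0U : p0 ∈ pvU land := pvOil_mem_pvU (hoilmem p0 hp0')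
    have hlt : pvUcard land seeds < (pvU land).card := by
      apply Finset.card_lt_card
      rw [Finset.ssubset_iff_of_subset (Finset.filter_subset _ _)]
      exact ⟨p0, hp0U, by simp only [Finset.mem_filter, not_and, not_not]; intro _; exact hp0'⟩
    rw [pvU_card] at hlt
    omega

-- ---- assembly ----

lemma pvPerColumn (land : List (List Int)) {st} (hS : pvSInv land st)
    (hcov : pvCov land (fun _ => True) st.1) {w : Int} (hw : 0 ≤ w) (hwW : w < pvW land) :
    pvColSum st.2.1 (pvColLabels st.1 (pvH land) w) =
      PySem.List.len (pvGrow land (pvH land) (pvW land) ((pvH land) * (pvW land)).toNat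
        (pvColInit land (pvH land) w).1 (pvColInit land (pvH land) w).2) := by
  obtain ⟨hsum, hiff⟩ := pvColA_card hS hcov hw hwW
  obtain ⟨hGI, hfuel⟩ := pvColInit_spec hw hwW
  obtain ⟨hnd, hmem⟩ := pvGrow_post ((pvH land * pvW land).toNat) _ _ hGI hfuel
  rw [hsum, PySem.List.len_eq, ← List.toFinset_card_of_nodup hnd]
  norm_cast
  congr 1
  ext p
  rw [List.mem_toFinset, hmem p, ← hiff p, Finset.mem_filter]

-- ===== VERDICT (by name: the statement is the Claim_ definition above) =====
theorem solution_spec : Claim_equal_solution := by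
  intro land _hdom _hpre
  unfold Spec_solution solution solution_alt
  dsimp only
  rw [show PySem.List.len (PySem.List.pyGetD land 0 []) = pvW land from rfl,
    show PySem.List.len land = pvH land from rfl]
  obtain ⟨hS, hcov⟩ := pvScan_post land
  refine PySem.List.foldl_congr_mem _ _ _ _ ?_
  intro acc w hw
  rw [PySem.List.mem_pyRange_one] at hw
  rw [pvPerColumn land hS hcov hw.1 hw.2]
  by_cases h : PySem.List.len (pvGrow land (pvH land) (pvW land)
      ((pvH land) * (pvW land)).toNat (pvColInit land (pvH land) w).1
      (pvColInit land (pvH land) w).2) ≤ acc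
  · rw [if_neg (by omega), max_eq_left h]
  · rw [if_pos (by omega), max_eq_right (by omega)]
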